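-- pv_equiv track=rewrite | github.com/Timozino/bincom-assignments | python_class_question.py | process_binary_sequence
-- ===== SOURCE A (Python) =====
-- def process_binary_sequence(binary_input):
--     output = []
--     for i in range(len(binary_input)):
--         chunk = binary_input[max(0, i - 2):i + 1]  # Get the 3-character chunk
--         if chunk.count('1') == 3:
--             output.append('1')
--         else:
--             output.append('0')
--     return ''.join(output)
-- ===== SOURCE B (Python) =====
-- def process_binary_sequence(binary_input):
--     # Single pass maintaining the length of the current run of trailing '1's,
--     # instead of re-slicing and counting a 3-char window at every position.
--     run = 0
--     output = []
--     for c in binary_input: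
--         run = run + 1 if c == '1' else 0
--         output.append('1' if run >= 3 else '0')
--     return ''.join(output)
-- ===== Notes on version B (the rewrite author's own statement) =====
-- stated objective: alternative
-- what changed: B replaces A's per-index slicing of a 3-character window (and counting the ones in it) by a single pass that maintains a running count of consecutive trailing one-characters and emits a one exactly when that count reaches 3.
import Mathlib
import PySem

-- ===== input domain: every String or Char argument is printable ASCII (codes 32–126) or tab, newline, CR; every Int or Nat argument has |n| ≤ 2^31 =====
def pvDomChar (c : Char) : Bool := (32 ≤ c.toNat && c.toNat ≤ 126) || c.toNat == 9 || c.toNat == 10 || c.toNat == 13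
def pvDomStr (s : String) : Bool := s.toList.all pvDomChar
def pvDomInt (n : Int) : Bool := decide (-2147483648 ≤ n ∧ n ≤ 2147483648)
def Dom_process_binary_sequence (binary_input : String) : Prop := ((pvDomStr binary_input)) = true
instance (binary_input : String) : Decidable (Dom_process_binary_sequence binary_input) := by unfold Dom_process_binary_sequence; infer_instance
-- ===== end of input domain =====

-- A slices a 3-char window at every index and counts '1's in it; B is a single pass
-- maintaining a running count of consecutive trailing '1's (alternative decomposition).


-- ===== PORT A =====
-- Strings are handled on code points (List Char); ''.join is PySem.Chars.join.
def process_binary_sequence (binary_input : String) : String :=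
  let cs := binary_input.toList
  let output : List (List Char) :=
    (PySem.List.pyRange 0 (PySem.Chars.len cs) 1).foldl (fun output i =>
      let chunk := PySem.Chars.slice cs (some (max 0 (i - 2))) (some (i + 1))
      if PySem.Chars.count chunk ['1'] = 3 then output ++ [['1']] else output ++ [['0']]) []
  String.ofList (PySem.Chars.join [] output)

-- ===== PORT B =====
def process_binary_sequence_alt (binary_input : String) : String :=
  let st := binary_input.toList.foldl
    (fun (st : Nat × List (List Char)) c =>
      let run := if c = '1' then st.1 + 1 else 0
      (run, st.2 ++ [if 3 ≤ run then ['1'] else ['0']])) (0, [])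
  String.ofList (PySem.Chars.join [] st.2)

-- ===== PRECONDITION & SPEC =====
def Spec_process_binary_sequence (binary_input : String) (out : String) : Prop := out = process_binary_sequence_alt binary_input
instance (binary_input : String) (out : String) : Decidable (Spec_process_binary_sequence binary_input out) := by unfold Spec_process_binary_sequence; infer_instance

-- ===== CLAIM (what is proved, stated in full; the proofs are below) =====
def Claim_equal_process_binary_sequence : Prop := ∀ (binary_input : String), Dom_process_binary_sequence binary_input → Spec_process_binary_sequence binary_input (process_binary_sequence binary_input)

-- ===== LEMMAS AND PROOFS =====

-- run length of trailing '1's in the first k characters of cs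
def pvR (cs : List Char) : Nat → Nat
  | 0 => 0
  | k + 1 => if cs.getD k 'x' = '1' then pvR cs k + 1 else 0

-- the output chunk both programs emit at position k
def pvBit (cs : List Char) (k : Nat) : List Char :=
  if 3 ≤ pvR cs (k + 1) then ['1'] else ['0']

lemma pvR_le (cs : List Char) : ∀ k, pvR cs k ≤ k := by
  intro k; induction k with
  | zero => simp [pvR]
  | succ k ih => simp only [pvR]; split <;> omega

lemma count3_iff (a b c : Char) :
    PySem.Chars.count [a, b, c] ['1'] = 3 ↔ (a = '1' ∧ b = '1' ∧ c = '1') := by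
  by_cases ha : a = '1' <;> by_cases hb : b = '1' <;> by_cases hc : c = '1' <;>
    simp [PySem.Chars.count, PySem.Chars.count.go, ha, hb, hc, List.isPrefixOf] <;>
    (try split_ifs) <;> simp_all [eq_comm]

lemma count1_ne (a : Char) : PySem.Chars.count [a] ['1'] ≠ 3 := by
  by_cases ha : a = '1' <;>
    simp [PySem.Chars.count, PySem.Chars.count.go, ha, List.isPrefixOf] <;>
    (try split_ifs) <;> simp_all [eq_comm]

lemma count2_ne (a b : Char) : PySem.Chars.count [a, b] ['1'] ≠ 3 := by
  by_cases ha : a = '1' <;> by_cases hb : b = '1' <;>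
    simp [PySem.Chars.count, PySem.Chars.count.go, ha, hb, List.isPrefixOf] <;>
    (try split_ifs) <;> simp_all [eq_comm]

lemma getD_append_at (pre t : List Char) (i : Nat) :
    (pre ++ t).getD (pre.length + i) 'x' = t.getD i 'x' := by
  rw [List.getD_eq_getElem?_getD, List.getD_eq_getElem?_getD,
    List.getElem?_append_right (by omega)]
  have h : pre.length + i - pre.length = i := by omega
  rw [h]

-- the crux: A's window condition at index n equals "running count reaches 3"
lemma crux (cs : List Char) (n : Nat) (hn : n < cs.length) :
    (PySem.Chars.count
        (PySem.Chars.slice cs (some (max 0 ((n : Int) - 2))) (some ((n : Int) + 1))) ['1'] = 3)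
      ↔ 3 ≤ pvR cs (n + 1) := by
  match n, hn with
  | 0, hn =>
    have ha : max 0 ((((0 : Nat) : Int)) - 2) = ((0 : Nat) : Int) := by norm_num
    have hb : (((0 : Nat) : Int)) + 1 = ((1 : Nat) : Int) := by norm_num
    rw [ha, hb, PySem.Chars.slice_eq_listSlice, PySem.List.slice_natCast]
    obtain ⟨a, t, rfl⟩ : ∃ a t, cs = a :: t := by
      cases cs with
      | nil => simp at hn
      | cons a t => exact ⟨a, t, rfl⟩
    simp only [List.drop_zero, List.take]
    constructor
    · intro h; exact absurd h (count1_ne a)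
    · intro h; have := pvR_le (a :: t) (0 + 1); omega
  | 1, hn =>
    have ha : max 0 ((((1 : Nat) : Int)) - 2) = ((0 : Nat) : Int) := by norm_num
    have hb : (((1 : Nat) : Int)) + 1 = ((2 : Nat) : Int) := by norm_num
    rw [ha, hb, PySem.Chars.slice_eq_listSlice, PySem.List.slice_natCast]
    obtain ⟨a, b, t, rfl⟩ : ∃ a b t, cs = a :: b :: t := by
      match cs, hn with
      | a :: b :: t, _ => exact ⟨a, b, t, rfl⟩
    simp only [List.drop_zero, List.take]
    constructor
    · intro h; exact absurd h (count2_ne a b)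
    · intro h; have := pvR_le (a :: b :: t) (1 + 1); omega
  | m + 2, hn =>
    have ha : max 0 ((((m + 2 : Nat) : Int)) - 2) = ((m : Nat) : Int) := by push_cast; omega
    have hb : (((m + 2 : Nat) : Int)) + 1 = ((m + 3 : Nat) : Int) := by push_cast; ring
    rw [ha, hb, PySem.Chars.slice_eq_listSlice, PySem.List.slice_natCast]
    have hsub : m + 3 - m = 3 := by omega
    rw [hsub]
    obtain ⟨a, b, c, t, hd⟩ : ∃ a b c t, cs.drop m = a :: b :: c :: t := by
      match h : cs.drop m, (by simp; omega : 3 ≤ (cs.drop m).length) with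
      | a :: b :: c :: t, _ => exact ⟨a, b, c, t, rfl⟩
    obtain ⟨p, hp, hlen⟩ : ∃ p, cs = p ++ (a :: b :: c :: t) ∧ p.length = m :=
      ⟨cs.take m, by rw [← hd, List.take_append_drop], by simp; omega⟩
    have hget : ∀ (i : Nat), cs.getD (m + i) 'x' = (a :: b :: c :: t).getD i 'x' := by
      intro i
      rw [hp, ← hlen, getD_append_at]
    have hga : cs.getD m 'x' = a := by simpa using hget 0
    have hgb : cs.getD (m + 1) 'x' = b := hget 1
    have hgc : cs.getD (m + 2) 'x' = c := hget 2
    rw [hd]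
    simp only [List.take]
    rw [count3_iff]
    simp only [pvR, hga, hgb, hgc]
    by_cases h3 : a = '1' <;> by_cases h4 : b = '1' <;> by_cases h5 : c = '1' <;>
      simp [h3, h4, h5]

-- A's fold over range(n) produces the pvBit sequence
lemma A_fold (cs : List Char) : ∀ (n : Nat), n ≤ cs.length → ∀ acc : List (List Char),
    (PySem.List.pyRange 0 (n : Int) 1).foldl
      (fun output i =>
        if PySem.Chars.count (PySem.Chars.slice cs (some (max 0 (i - 2))) (some (i + 1))) ['1'] = 3
        then output ++ [['1']] else output ++ [['0']]) acc
      = acc ++ (List.range n).map (pvBit cs) := by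
  intro n
  induction n with
  | zero => intro _ acc; simp
  | succ n ih =>
    intro hn acc
    have hsplit : PySem.List.pyRange 0 ((n + 1 : Nat) : Int) 1
        = PySem.List.pyRange 0 (n : Int) 1 ++ [(n : Int)] := by
      have hc : ((n + 1 : Nat) : Int) = (n : Int) + 1 := by push_cast; ring
      rw [hc]
      exact PySem.List.pyRange_one_succ_right (Int.natCast_nonneg n)
    rw [hsplit, List.foldl_append, ih (by omega) acc, List.range_succ, List.map_append]
    simp only [List.foldl_cons, List.foldl_nil, List.map_cons, List.map_nil]
    have hcond := crux cs n (by omega)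
    by_cases h : 3 ≤ pvR cs (n + 1)
    · rw [if_pos (hcond.mpr h)]
      simp [pvBit, h]
    · rw [if_neg (fun hc => h (hcond.mp hc))]
      simp [pvBit, h]

-- B's fold: invariant over a split cs = pre ++ ds
lemma B_fold (cs : List Char) : ∀ (ds pre : List Char) (acc : List (List Char)),
    cs = pre ++ ds →
    ds.foldl
      (fun (st : Nat × List (List Char)) c =>
        (if c = '1' then st.1 + 1 else 0,
         st.2 ++ [if 3 ≤ (if c = '1' then st.1 + 1 else 0) then ['1'] else ['0']]))
      (pvR cs pre.length, acc)
      = (pvR cs cs.length,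
         acc ++ (List.range ds.length).map (fun j => pvBit cs (pre.length + j))) := by
  intro ds
  induction ds with
  | nil =>
    intro pre acc h
    simp [h]
  | cons d ds ih =>
    intro pre acc h
    simp only [List.foldl_cons]
    have hd : cs.getD pre.length 'x' = d := by
      rw [h, ← Nat.add_zero pre.length, getD_append_at]
      rfl
    have hrun : (if d = '1' then pvR cs pre.length + 1 else 0) = pvR cs (pre.length + 1) := by
      simp only [pvR]
      rw [hd]
    have h2 : cs = (pre ++ [d]) ++ ds := by simp [h]
    have hih := ih (pre ++ [d]) (acc ++ [if 3 ≤ pvR cs (pre.length + 1) then ['1'] else ['0']]) h2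
    simp only [List.length_append, List.length_cons, List.length_nil, Nat.zero_add] at hih ⊢
    have hmap : (List.range (ds.length + 1)).map (fun j => pvBit cs (pre.length + j))
        = (if 3 ≤ pvR cs (pre.length + 1) then ['1'] else ['0'])
          :: (List.range ds.length).map (fun j => pvBit cs (pre.length + 1 + j)) := by
      rw [List.range_succ_eq_map, List.map_cons, List.map_map]
      congr 1
      refine List.map_congr_left (fun j hj => ?_)
      simp only [Function.comp_apply]
      congr 1
      omega
    rw [hrun, hih, hmap]
    simp

-- ===== VERDICT (by name: the statement is the Claim_ definition above) =====
theorem process_binary_sequence_spec : Claim_equal_process_binary_sequence := by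
  intro binary_input _
  unfold Spec_process_binary_sequence
  simp only [process_binary_sequence, process_binary_sequence_alt, PySem.Chars.len_eq]
  rw [A_fold binary_input.toList binary_input.toList.length (le_refl _) []]
  have hb := B_fold binary_input.toList binary_input.toList [] [] (by simp)
  simp only [List.length_nil, List.nil_append] at hb
  rw [show pvR binary_input.toList 0 = 0 from rfl] at hb
  rw [hb]
  simp
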